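-- pv_equiv track=rewrite | github.com/nilsso/nth | tests/test_nth_patterns.py | _strict_params_range
-- ===== SOURCE A (Python) =====
-- ST = "st"
--
-- ND = "nd"
--
-- RD = "rd"
--
-- TH = "th"
--
-- def _strict_params_range(
--     thousandths: int,
--     hundredths: int,
-- ):
--     start = 1000 * thousandths + 100 * hundredths
--
--     def _tens(tens: int):
--         _start = start + 10 * tens
--         return [
--             (_start + 0, TH),
--             (_start + 1, ST),
--             (_start + 2, ND),
--             (_start + 3, RD),
--             *[(_start + n, TH) for n in range(4, 10)],
--         ]
--
--     return [
--         *_tens(0),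
--         *[(start + n, TH) for n in range(10, 20)],
--         *[p for tens in range(2, 10) for p in _tens(tens)],
--     ]
-- ===== SOURCE B (Python) =====
-- _SUFFIX = {1: "st", 2: "nd", 3: "rd"}
--
--
-- def _strict_params_range(
--     thousandths: int,
--     hundredths: int,
-- ):
--     start = 1000 * thousandths + 100 * hundredths
--     result = []
--     for k in range(100):
--         if k % 100 in (11, 12, 13):
--             suffix = "th"
--         else:
--             suffix = _SUFFIX.get(k % 10, "th")
--         result.append((start + k, suffix))
--     return result
-- ===== Notes on version B (the rewrite author's own statement) =====
-- stated objective: idiomatic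
-- what changed: Replaces A's hardcoded per-tens-block suffix table (a special _tens helper plus a special-cased 10-19 block) with one sequential loop over range(100) that computes each suffix from the standard ordinal rule: 'th' for k%100 in (11,12,13), else a {1:'st',2:'nd',3:'rd'} lookup on k%10 defaulting to 'th'.
import Mathlib
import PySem

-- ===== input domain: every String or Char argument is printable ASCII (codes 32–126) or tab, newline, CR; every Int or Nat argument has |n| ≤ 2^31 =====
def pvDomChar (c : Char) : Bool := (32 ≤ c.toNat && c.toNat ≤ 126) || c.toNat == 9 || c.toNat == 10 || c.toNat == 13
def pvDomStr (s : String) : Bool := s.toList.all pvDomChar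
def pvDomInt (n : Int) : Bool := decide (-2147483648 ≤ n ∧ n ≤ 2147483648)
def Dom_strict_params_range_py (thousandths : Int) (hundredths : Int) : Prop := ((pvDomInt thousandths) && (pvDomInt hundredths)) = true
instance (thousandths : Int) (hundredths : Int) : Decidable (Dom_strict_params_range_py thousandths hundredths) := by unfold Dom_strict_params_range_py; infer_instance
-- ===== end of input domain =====

-- B replaces A's hardcoded per-tens-block table with one loop computing each suffix
-- from the standard modular ordinal rule (objective: idiomatic).

-- ===== PORT A =====
-- the module constants ST/ND/RD/TH
def pvST : String := "st"
def pvND : String := "nd"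
def pvRD : String := "rd"
def pvTH : String := "th"

-- A's inner helper _tens (closure over start)
def pvTensA (start : Int) (tens : Int) : List (Int × String) :=
  let _start := start + 10 * tens
  [(_start + 0, pvTH), (_start + 1, pvST), (_start + 2, pvND), (_start + 3, pvRD)]
    ++ (PySem.List.pyRange 4 10 1).map (fun n => (_start + n, pvTH))

def strict_params_range_py (thousandths : Int) (hundredths : Int) : List (Int × String) :=
  let start := 1000 * thousandths + 100 * hundredths
  pvTensA start 0
    ++ (PySem.List.pyRange 10 20 1).map (fun n => (start + n, pvTH))
    ++ (PySem.List.pyRange 2 10 1).flatMap (fun tens => pvTensA start tens)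

-- ===== PORT B =====
-- the module dict _SUFFIX
def pvSUFFIX : PySem.Dict Int String := PySem.Dict.ofList [(1, "st"), (2, "nd"), (3, "rd")]

def strict_params_range_py_alt (thousandths : Int) (hundredths : Int) : List (Int × String) :=
  let start := 1000 * thousandths + 100 * hundredths
  (PySem.List.pyRange 0 100 1).foldl
    (fun result k =>
      let suffix :=
        if PySem.Int.mod k 100 = 11 ∨ PySem.Int.mod k 100 = 12 ∨ PySem.Int.mod k 100 = 13 then "th"
        else PySem.Dict.getD pvSUFFIX (PySem.Int.mod k 10) "th"
      result ++ [(start + k, suffix)]) []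

-- ===== PRECONDITION & SPEC =====
def Spec_strict_params_range_py (thousandths : Int) (hundredths : Int) (out : List (Int × String)) : Prop := out = strict_params_range_py_alt thousandths hundredths
instance (thousandths : Int) (hundredths : Int) (out : List (Int × String)) : Decidable (Spec_strict_params_range_py thousandths hundredths out) := by unfold Spec_strict_params_range_py; infer_instance

-- ===== CLAIM (what is proved, stated in full; the proofs are below) =====
def Claim_equal_strict_params_range_py : Prop := ∀ (thousandths : Int) (hundredths : Int), Dom_strict_params_range_py thousandths hundredths → Spec_strict_params_range_py thousandths hundredths (strict_params_range_py thousandths hundredths)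

-- ===== LEMMAS AND PROOFS =====

-- ===== VERDICT (by name: the statement is the Claim_ definition above) =====
-- proof-only helper: range(100) as a literal list
def pvRange100 : List Int := [0,1,2,3,4,5,6,7,8,9,10,11,12,13,14,15,16,17,18,19,20,21,22,23,24,25,26,27,28,29,30,31,32,33,34,35,36,37,38,39,40,41,42,43,44,45,46,47,48,49,50,51,52,53,54,55,56,57,58,59,60,61,62,63,64,65,66,67,68,69,70,71,72,73,74,75,76,77,78,79,80,81,82,83,84,85,86,87,88,89,90,91,92,93,94,95,96,97,98,99]

theorem strict_params_range_py_spec : Claim_equal_strict_params_range_py := by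
  intro t h _
  show _ = _
  have r0 : PySem.List.pyRange 0 100 1 = pvRange100 := by decide
  have r1 : PySem.List.pyRange 4 10 1 = [4, 5, 6, 7, 8, 9] := by decide
  have r2 : PySem.List.pyRange 10 20 1 =
      [10, 11, 12, 13, 14, 15, 16, 17, 18, 19] := by decide
  have r3 : PySem.List.pyRange 2 10 1 = [2, 3, 4, 5, 6, 7, 8, 9] := by decide
  have c0 : (if PySem.Int.mod 0 100 = 11 ∨ PySem.Int.mod 0 100 = 12 ∨ PySem.Int.mod 0 100 = 13 then "th" else PySem.Dict.getD pvSUFFIX (PySem.Int.mod 0 10) "th") = "th" := by decide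
  have c1 : (if PySem.Int.mod 1 100 = 11 ∨ PySem.Int.mod 1 100 = 12 ∨ PySem.Int.mod 1 100 = 13 then "th" else PySem.Dict.getD pvSUFFIX (PySem.Int.mod 1 10) "th") = "st" := by decide
  have c2 : (if PySem.Int.mod 2 100 = 11 ∨ PySem.Int.mod 2 100 = 12 ∨ PySem.Int.mod 2 100 = 13 then "th" else PySem.Dict.getD pvSUFFIX (PySem.Int.mod 2 10) "th") = "nd" := by decide
  have c3 : (if PySem.Int.mod 3 100 = 11 ∨ PySem.Int.mod 3 100 = 12 ∨ PySem.Int.mod 3 100 = 13 then "th" else PySem.Dict.getD pvSUFFIX (PySem.Int.mod 3 10) "th") = "rd" := by decide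
  have c4 : (if PySem.Int.mod 4 100 = 11 ∨ PySem.Int.mod 4 100 = 12 ∨ PySem.Int.mod 4 100 = 13 then "th" else PySem.Dict.getD pvSUFFIX (PySem.Int.mod 4 10) "th") = "th" := by decide
  have c5 : (if PySem.Int.mod 5 100 = 11 ∨ PySem.Int.mod 5 100 = 12 ∨ PySem.Int.mod 5 100 = 13 then "th" else PySem.Dict.getD pvSUFFIX (PySem.Int.mod 5 10) "th") = "th" := by decide
  have c6 : (if PySem.Int.mod 6 100 = 11 ∨ PySem.Int.mod 6 100 = 12 ∨ PySem.Int.mod 6 100 = 13 then "th" else PySem.Dict.getD pvSUFFIX (PySem.Int.mod 6 10) "th") = "th" := by decide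
  have c7 : (if PySem.Int.mod 7 100 = 11 ∨ PySem.Int.mod 7 100 = 12 ∨ PySem.Int.mod 7 100 = 13 then "th" else PySem.Dict.getD pvSUFFIX (PySem.Int.mod 7 10) "th") = "th" := by decide
  have c8 : (if PySem.Int.mod 8 100 = 11 ∨ PySem.Int.mod 8 100 = 12 ∨ PySem.Int.mod 8 100 = 13 then "th" else PySem.Dict.getD pvSUFFIX (PySem.Int.mod 8 10) "th") = "th" := by decide
  have c9 : (if PySem.Int.mod 9 100 = 11 ∨ PySem.Int.mod 9 100 = 12 ∨ PySem.Int.mod 9 100 = 13 then "th" else PySem.Dict.getD pvSUFFIX (PySem.Int.mod 9 10) "th") = "th" := by decide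
  have c10 : (if PySem.Int.mod 10 100 = 11 ∨ PySem.Int.mod 10 100 = 12 ∨ PySem.Int.mod 10 100 = 13 then "th" else PySem.Dict.getD pvSUFFIX (PySem.Int.mod 10 10) "th") = "th" := by decide
  have c11 : (if PySem.Int.mod 11 100 = 11 ∨ PySem.Int.mod 11 100 = 12 ∨ PySem.Int.mod 11 100 = 13 then "th" else PySem.Dict.getD pvSUFFIX (PySem.Int.mod 11 10) "th") = "th" := by decide
  have c12 : (if PySem.Int.mod 12 100 = 11 ∨ PySem.Int.mod 12 100 = 12 ∨ PySem.Int.mod 12 100 = 13 then "th" else PySem.Dict.getD pvSUFFIX (PySem.Int.mod 12 10) "th") = "th" := by decide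
  have c13 : (if PySem.Int.mod 13 100 = 11 ∨ PySem.Int.mod 13 100 = 12 ∨ PySem.Int.mod 13 100 = 13 then "th" else PySem.Dict.getD pvSUFFIX (PySem.Int.mod 13 10) "th") = "th" := by decide
  have c14 : (if PySem.Int.mod 14 100 = 11 ∨ PySem.Int.mod 14 100 = 12 ∨ PySem.Int.mod 14 100 = 13 then "th" else PySem.Dict.getD pvSUFFIX (PySem.Int.mod 14 10) "th") = "th" := by decide
  have c15 : (if PySem.Int.mod 15 100 = 11 ∨ PySem.Int.mod 15 100 = 12 ∨ PySem.Int.mod 15 100 = 13 then "th" else PySem.Dict.getD pvSUFFIX (PySem.Int.mod 15 10) "th") = "th" := by decide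
  have c16 : (if PySem.Int.mod 16 100 = 11 ∨ PySem.Int.mod 16 100 = 12 ∨ PySem.Int.mod 16 100 = 13 then "th" else PySem.Dict.getD pvSUFFIX (PySem.Int.mod 16 10) "th") = "th" := by decide
  have c17 : (if PySem.Int.mod 17 100 = 11 ∨ PySem.Int.mod 17 100 = 12 ∨ PySem.Int.mod 17 100 = 13 then "th" else PySem.Dict.getD pvSUFFIX (PySem.Int.mod 17 10) "th") = "th" := by decide
  have c18 : (if PySem.Int.mod 18 100 = 11 ∨ PySem.Int.mod 18 100 = 12 ∨ PySem.Int.mod 18 100 = 13 then "th" else PySem.Dict.getD pvSUFFIX (PySem.Int.mod 18 10) "th") = "th" := by decide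
  have c19 : (if PySem.Int.mod 19 100 = 11 ∨ PySem.Int.mod 19 100 = 12 ∨ PySem.Int.mod 19 100 = 13 then "th" else PySem.Dict.getD pvSUFFIX (PySem.Int.mod 19 10) "th") = "th" := by decide
  have c20 : (if PySem.Int.mod 20 100 = 11 ∨ PySem.Int.mod 20 100 = 12 ∨ PySem.Int.mod 20 100 = 13 then "th" else PySem.Dict.getD pvSUFFIX (PySem.Int.mod 20 10) "th") = "th" := by decide
  have c21 : (if PySem.Int.mod 21 100 = 11 ∨ PySem.Int.mod 21 100 = 12 ∨ PySem.Int.mod 21 100 = 13 then "th" else PySem.Dict.getD pvSUFFIX (PySem.Int.mod 21 10) "th") = "st" := by decide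
  have c22 : (if PySem.Int.mod 22 100 = 11 ∨ PySem.Int.mod 22 100 = 12 ∨ PySem.Int.mod 22 100 = 13 then "th" else PySem.Dict.getD pvSUFFIX (PySem.Int.mod 22 10) "th") = "nd" := by decide
  have c23 : (if PySem.Int.mod 23 100 = 11 ∨ PySem.Int.mod 23 100 = 12 ∨ PySem.Int.mod 23 100 = 13 then "th" else PySem.Dict.getD pvSUFFIX (PySem.Int.mod 23 10) "th") = "rd" := by decide
  have c24 : (if PySem.Int.mod 24 100 = 11 ∨ PySem.Int.mod 24 100 = 12 ∨ PySem.Int.mod 24 100 = 13 then "th" else PySem.Dict.getD pvSUFFIX (PySem.Int.mod 24 10) "th") = "th" := by decide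
  have c25 : (if PySem.Int.mod 25 100 = 11 ∨ PySem.Int.mod 25 100 = 12 ∨ PySem.Int.mod 25 100 = 13 then "th" else PySem.Dict.getD pvSUFFIX (PySem.Int.mod 25 10) "th") = "th" := by decide
  have c26 : (if PySem.Int.mod 26 100 = 11 ∨ PySem.Int.mod 26 100 = 12 ∨ PySem.Int.mod 26 100 = 13 then "th" else PySem.Dict.getD pvSUFFIX (PySem.Int.mod 26 10) "th") = "th" := by decide
  have c27 : (if PySem.Int.mod 27 100 = 11 ∨ PySem.Int.mod 27 100 = 12 ∨ PySem.Int.mod 27 100 = 13 then "th" else PySem.Dict.getD pvSUFFIX (PySem.Int.mod 27 10) "th") = "th" := by decide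
  have c28 : (if PySem.Int.mod 28 100 = 11 ∨ PySem.Int.mod 28 100 = 12 ∨ PySem.Int.mod 28 100 = 13 then "th" else PySem.Dict.getD pvSUFFIX (PySem.Int.mod 28 10) "th") = "th" := by decide
  have c29 : (if PySem.Int.mod 29 100 = 11 ∨ PySem.Int.mod 29 100 = 12 ∨ PySem.Int.mod 29 100 = 13 then "th" else PySem.Dict.getD pvSUFFIX (PySem.Int.mod 29 10) "th") = "th" := by decide
  have c30 : (if PySem.Int.mod 30 100 = 11 ∨ PySem.Int.mod 30 100 = 12 ∨ PySem.Int.mod 30 100 = 13 then "th" else PySem.Dict.getD pvSUFFIX (PySem.Int.mod 30 10) "th") = "th" := by decide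
  have c31 : (if PySem.Int.mod 31 100 = 11 ∨ PySem.Int.mod 31 100 = 12 ∨ PySem.Int.mod 31 100 = 13 then "th" else PySem.Dict.getD pvSUFFIX (PySem.Int.mod 31 10) "th") = "st" := by decide
  have c32 : (if PySem.Int.mod 32 100 = 11 ∨ PySem.Int.mod 32 100 = 12 ∨ PySem.Int.mod 32 100 = 13 then "th" else PySem.Dict.getD pvSUFFIX (PySem.Int.mod 32 10) "th") = "nd" := by decide
  have c33 : (if PySem.Int.mod 33 100 = 11 ∨ PySem.Int.mod 33 100 = 12 ∨ PySem.Int.mod 33 100 = 13 then "th" else PySem.Dict.getD pvSUFFIX (PySem.Int.mod 33 10) "th") = "rd" := by decide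
  have c34 : (if PySem.Int.mod 34 100 = 11 ∨ PySem.Int.mod 34 100 = 12 ∨ PySem.Int.mod 34 100 = 13 then "th" else PySem.Dict.getD pvSUFFIX (PySem.Int.mod 34 10) "th") = "th" := by decide
  have c35 : (if PySem.Int.mod 35 100 = 11 ∨ PySem.Int.mod 35 100 = 12 ∨ PySem.Int.mod 35 100 = 13 then "th" else PySem.Dict.getD pvSUFFIX (PySem.Int.mod 35 10) "th") = "th" := by decide
  have c36 : (if PySem.Int.mod 36 100 = 11 ∨ PySem.Int.mod 36 100 = 12 ∨ PySem.Int.mod 36 100 = 13 then "th" else PySem.Dict.getD pvSUFFIX (PySem.Int.mod 36 10) "th") = "th" := by decide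
  have c37 : (if PySem.Int.mod 37 100 = 11 ∨ PySem.Int.mod 37 100 = 12 ∨ PySem.Int.mod 37 100 = 13 then "th" else PySem.Dict.getD pvSUFFIX (PySem.Int.mod 37 10) "th") = "th" := by decide
  have c38 : (if PySem.Int.mod 38 100 = 11 ∨ PySem.Int.mod 38 100 = 12 ∨ PySem.Int.mod 38 100 = 13 then "th" else PySem.Dict.getD pvSUFFIX (PySem.Int.mod 38 10) "th") = "th" := by decide
  have c39 : (if PySem.Int.mod 39 100 = 11 ∨ PySem.Int.mod 39 100 = 12 ∨ PySem.Int.mod 39 100 = 13 then "th" else PySem.Dict.getD pvSUFFIX (PySem.Int.mod 39 10) "th") = "th" := by decide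
  have c40 : (if PySem.Int.mod 40 100 = 11 ∨ PySem.Int.mod 40 100 = 12 ∨ PySem.Int.mod 40 100 = 13 then "th" else PySem.Dict.getD pvSUFFIX (PySem.Int.mod 40 10) "th") = "th" := by decide
  have c41 : (if PySem.Int.mod 41 100 = 11 ∨ PySem.Int.mod 41 100 = 12 ∨ PySem.Int.mod 41 100 = 13 then "th" else PySem.Dict.getD pvSUFFIX (PySem.Int.mod 41 10) "th") = "st" := by decide
  have c42 : (if PySem.Int.mod 42 100 = 11 ∨ PySem.Int.mod 42 100 = 12 ∨ PySem.Int.mod 42 100 = 13 then "th" else PySem.Dict.getD pvSUFFIX (PySem.Int.mod 42 10) "th") = "nd" := by decide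
  have c43 : (if PySem.Int.mod 43 100 = 11 ∨ PySem.Int.mod 43 100 = 12 ∨ PySem.Int.mod 43 100 = 13 then "th" else PySem.Dict.getD pvSUFFIX (PySem.Int.mod 43 10) "th") = "rd" := by decide
  have c44 : (if PySem.Int.mod 44 100 = 11 ∨ PySem.Int.mod 44 100 = 12 ∨ PySem.Int.mod 44 100 = 13 then "th" else PySem.Dict.getD pvSUFFIX (PySem.Int.mod 44 10) "th") = "th" := by decide
  have c45 : (if PySem.Int.mod 45 100 = 11 ∨ PySem.Int.mod 45 100 = 12 ∨ PySem.Int.mod 45 100 = 13 then "th" else PySem.Dict.getD pvSUFFIX (PySem.Int.mod 45 10) "th") = "th" := by decide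
  have c46 : (if PySem.Int.mod 46 100 = 11 ∨ PySem.Int.mod 46 100 = 12 ∨ PySem.Int.mod 46 100 = 13 then "th" else PySem.Dict.getD pvSUFFIX (PySem.Int.mod 46 10) "th") = "th" := by decide
  have c47 : (if PySem.Int.mod 47 100 = 11 ∨ PySem.Int.mod 47 100 = 12 ∨ PySem.Int.mod 47 100 = 13 then "th" else PySem.Dict.getD pvSUFFIX (PySem.Int.mod 47 10) "th") = "th" := by decide
  have c48 : (if PySem.Int.mod 48 100 = 11 ∨ PySem.Int.mod 48 100 = 12 ∨ PySem.Int.mod 48 100 = 13 then "th" else PySem.Dict.getD pvSUFFIX (PySem.Int.mod 48 10) "th") = "th" := by decide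
  have c49 : (if PySem.Int.mod 49 100 = 11 ∨ PySem.Int.mod 49 100 = 12 ∨ PySem.Int.mod 49 100 = 13 then "th" else PySem.Dict.getD pvSUFFIX (PySem.Int.mod 49 10) "th") = "th" := by decide
  have c50 : (if PySem.Int.mod 50 100 = 11 ∨ PySem.Int.mod 50 100 = 12 ∨ PySem.Int.mod 50 100 = 13 then "th" else PySem.Dict.getD pvSUFFIX (PySem.Int.mod 50 10) "th") = "th" := by decide
  have c51 : (if PySem.Int.mod 51 100 = 11 ∨ PySem.Int.mod 51 100 = 12 ∨ PySem.Int.mod 51 100 = 13 then "th" else PySem.Dict.getD pvSUFFIX (PySem.Int.mod 51 10) "th") = "st" := by decide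
  have c52 : (if PySem.Int.mod 52 100 = 11 ∨ PySem.Int.mod 52 100 = 12 ∨ PySem.Int.mod 52 100 = 13 then "th" else PySem.Dict.getD pvSUFFIX (PySem.Int.mod 52 10) "th") = "nd" := by decide
  have c53 : (if PySem.Int.mod 53 100 = 11 ∨ PySem.Int.mod 53 100 = 12 ∨ PySem.Int.mod 53 100 = 13 then "th" else PySem.Dict.getD pvSUFFIX (PySem.Int.mod 53 10) "th") = "rd" := by decide
  have c54 : (if PySem.Int.mod 54 100 = 11 ∨ PySem.Int.mod 54 100 = 12 ∨ PySem.Int.mod 54 100 = 13 then "th" else PySem.Dict.getD pvSUFFIX (PySem.Int.mod 54 10) "th") = "th" := by decide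
  have c55 : (if PySem.Int.mod 55 100 = 11 ∨ PySem.Int.mod 55 100 = 12 ∨ PySem.Int.mod 55 100 = 13 then "th" else PySem.Dict.getD pvSUFFIX (PySem.Int.mod 55 10) "th") = "th" := by decide
  have c56 : (if PySem.Int.mod 56 100 = 11 ∨ PySem.Int.mod 56 100 = 12 ∨ PySem.Int.mod 56 100 = 13 then "th" else PySem.Dict.getD pvSUFFIX (PySem.Int.mod 56 10) "th") = "th" := by decide
  have c57 : (if PySem.Int.mod 57 100 = 11 ∨ PySem.Int.mod 57 100 = 12 ∨ PySem.Int.mod 57 100 = 13 then "th" else PySem.Dict.getD pvSUFFIX (PySem.Int.mod 57 10) "th") = "th" := by decide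
  have c58 : (if PySem.Int.mod 58 100 = 11 ∨ PySem.Int.mod 58 100 = 12 ∨ PySem.Int.mod 58 100 = 13 then "th" else PySem.Dict.getD pvSUFFIX (PySem.Int.mod 58 10) "th") = "th" := by decide
  have c59 : (if PySem.Int.mod 59 100 = 11 ∨ PySem.Int.mod 59 100 = 12 ∨ PySem.Int.mod 59 100 = 13 then "th" else PySem.Dict.getD pvSUFFIX (PySem.Int.mod 59 10) "th") = "th" := by decide
  have c60 : (if PySem.Int.mod 60 100 = 11 ∨ PySem.Int.mod 60 100 = 12 ∨ PySem.Int.mod 60 100 = 13 then "th" else PySem.Dict.getD pvSUFFIX (PySem.Int.mod 60 10) "th") = "th" := by decide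
  have c61 : (if PySem.Int.mod 61 100 = 11 ∨ PySem.Int.mod 61 100 = 12 ∨ PySem.Int.mod 61 100 = 13 then "th" else PySem.Dict.getD pvSUFFIX (PySem.Int.mod 61 10) "th") = "st" := by decide
  have c62 : (if PySem.Int.mod 62 100 = 11 ∨ PySem.Int.mod 62 100 = 12 ∨ PySem.Int.mod 62 100 = 13 then "th" else PySem.Dict.getD pvSUFFIX (PySem.Int.mod 62 10) "th") = "nd" := by decide
  have c63 : (if PySem.Int.mod 63 100 = 11 ∨ PySem.Int.mod 63 100 = 12 ∨ PySem.Int.mod 63 100 = 13 then "th" else PySem.Dict.getD pvSUFFIX (PySem.Int.mod 63 10) "th") = "rd" := by decide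
  have c64 : (if PySem.Int.mod 64 100 = 11 ∨ PySem.Int.mod 64 100 = 12 ∨ PySem.Int.mod 64 100 = 13 then "th" else PySem.Dict.getD pvSUFFIX (PySem.Int.mod 64 10) "th") = "th" := by decide
  have c65 : (if PySem.Int.mod 65 100 = 11 ∨ PySem.Int.mod 65 100 = 12 ∨ PySem.Int.mod 65 100 = 13 then "th" else PySem.Dict.getD pvSUFFIX (PySem.Int.mod 65 10) "th") = "th" := by decide
  have c66 : (if PySem.Int.mod 66 100 = 11 ∨ PySem.Int.mod 66 100 = 12 ∨ PySem.Int.mod 66 100 = 13 then "th" else PySem.Dict.getD pvSUFFIX (PySem.Int.mod 66 10) "th") = "th" := by decide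
  have c67 : (if PySem.Int.mod 67 100 = 11 ∨ PySem.Int.mod 67 100 = 12 ∨ PySem.Int.mod 67 100 = 13 then "th" else PySem.Dict.getD pvSUFFIX (PySem.Int.mod 67 10) "th") = "th" := by decide
  have c68 : (if PySem.Int.mod 68 100 = 11 ∨ PySem.Int.mod 68 100 = 12 ∨ PySem.Int.mod 68 100 = 13 then "th" else PySem.Dict.getD pvSUFFIX (PySem.Int.mod 68 10) "th") = "th" := by decide
  have c69 : (if PySem.Int.mod 69 100 = 11 ∨ PySem.Int.mod 69 100 = 12 ∨ PySem.Int.mod 69 100 = 13 then "th" else PySem.Dict.getD pvSUFFIX (PySem.Int.mod 69 10) "th") = "th" := by decide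
  have c70 : (if PySem.Int.mod 70 100 = 11 ∨ PySem.Int.mod 70 100 = 12 ∨ PySem.Int.mod 70 100 = 13 then "th" else PySem.Dict.getD pvSUFFIX (PySem.Int.mod 70 10) "th") = "th" := by decide
  have c71 : (if PySem.Int.mod 71 100 = 11 ∨ PySem.Int.mod 71 100 = 12 ∨ PySem.Int.mod 71 100 = 13 then "th" else PySem.Dict.getD pvSUFFIX (PySem.Int.mod 71 10) "th") = "st" := by decide
  have c72 : (if PySem.Int.mod 72 100 = 11 ∨ PySem.Int.mod 72 100 = 12 ∨ PySem.Int.mod 72 100 = 13 then "th" else PySem.Dict.getD pvSUFFIX (PySem.Int.mod 72 10) "th") = "nd" := by decide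
  have c73 : (if PySem.Int.mod 73 100 = 11 ∨ PySem.Int.mod 73 100 = 12 ∨ PySem.Int.mod 73 100 = 13 then "th" else PySem.Dict.getD pvSUFFIX (PySem.Int.mod 73 10) "th") = "rd" := by decide
  have c74 : (if PySem.Int.mod 74 100 = 11 ∨ PySem.Int.mod 74 100 = 12 ∨ PySem.Int.mod 74 100 = 13 then "th" else PySem.Dict.getD pvSUFFIX (PySem.Int.mod 74 10) "th") = "th" := by decide
  have c75 : (if PySem.Int.mod 75 100 = 11 ∨ PySem.Int.mod 75 100 = 12 ∨ PySem.Int.mod 75 100 = 13 then "th" else PySem.Dict.getD pvSUFFIX (PySem.Int.mod 75 10) "th") = "th" := by decide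
  have c76 : (if PySem.Int.mod 76 100 = 11 ∨ PySem.Int.mod 76 100 = 12 ∨ PySem.Int.mod 76 100 = 13 then "th" else PySem.Dict.getD pvSUFFIX (PySem.Int.mod 76 10) "th") = "th" := by decide
  have c77 : (if PySem.Int.mod 77 100 = 11 ∨ PySem.Int.mod 77 100 = 12 ∨ PySem.Int.mod 77 100 = 13 then "th" else PySem.Dict.getD pvSUFFIX (PySem.Int.mod 77 10) "th") = "th" := by decide
  have c78 : (if PySem.Int.mod 78 100 = 11 ∨ PySem.Int.mod 78 100 = 12 ∨ PySem.Int.mod 78 100 = 13 then "th" else PySem.Dict.getD pvSUFFIX (PySem.Int.mod 78 10) "th") = "th" := by decide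
  have c79 : (if PySem.Int.mod 79 100 = 11 ∨ PySem.Int.mod 79 100 = 12 ∨ PySem.Int.mod 79 100 = 13 then "th" else PySem.Dict.getD pvSUFFIX (PySem.Int.mod 79 10) "th") = "th" := by decide
  have c80 : (if PySem.Int.mod 80 100 = 11 ∨ PySem.Int.mod 80 100 = 12 ∨ PySem.Int.mod 80 100 = 13 then "th" else PySem.Dict.getD pvSUFFIX (PySem.Int.mod 80 10) "th") = "th" := by decide
  have c81 : (if PySem.Int.mod 81 100 = 11 ∨ PySem.Int.mod 81 100 = 12 ∨ PySem.Int.mod 81 100 = 13 then "th" else PySem.Dict.getD pvSUFFIX (PySem.Int.mod 81 10) "th") = "st" := by decide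
  have c82 : (if PySem.Int.mod 82 100 = 11 ∨ PySem.Int.mod 82 100 = 12 ∨ PySem.Int.mod 82 100 = 13 then "th" else PySem.Dict.getD pvSUFFIX (PySem.Int.mod 82 10) "th") = "nd" := by decide
  have c83 : (if PySem.Int.mod 83 100 = 11 ∨ PySem.Int.mod 83 100 = 12 ∨ PySem.Int.mod 83 100 = 13 then "th" else PySem.Dict.getD pvSUFFIX (PySem.Int.mod 83 10) "th") = "rd" := by decide
  have c84 : (if PySem.Int.mod 84 100 = 11 ∨ PySem.Int.mod 84 100 = 12 ∨ PySem.Int.mod 84 100 = 13 then "th" else PySem.Dict.getD pvSUFFIX (PySem.Int.mod 84 10) "th") = "th" := by decide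
  have c85 : (if PySem.Int.mod 85 100 = 11 ∨ PySem.Int.mod 85 100 = 12 ∨ PySem.Int.mod 85 100 = 13 then "th" else PySem.Dict.getD pvSUFFIX (PySem.Int.mod 85 10) "th") = "th" := by decide
  have c86 : (if PySem.Int.mod 86 100 = 11 ∨ PySem.Int.mod 86 100 = 12 ∨ PySem.Int.mod 86 100 = 13 then "th" else PySem.Dict.getD pvSUFFIX (PySem.Int.mod 86 10) "th") = "th" := by decide
  have c87 : (if PySem.Int.mod 87 100 = 11 ∨ PySem.Int.mod 87 100 = 12 ∨ PySem.Int.mod 87 100 = 13 then "th" else PySem.Dict.getD pvSUFFIX (PySem.Int.mod 87 10) "th") = "th" := by decide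
  have c88 : (if PySem.Int.mod 88 100 = 11 ∨ PySem.Int.mod 88 100 = 12 ∨ PySem.Int.mod 88 100 = 13 then "th" else PySem.Dict.getD pvSUFFIX (PySem.Int.mod 88 10) "th") = "th" := by decide
  have c89 : (if PySem.Int.mod 89 100 = 11 ∨ PySem.Int.mod 89 100 = 12 ∨ PySem.Int.mod 89 100 = 13 then "th" else PySem.Dict.getD pvSUFFIX (PySem.Int.mod 89 10) "th") = "th" := by decide
  have c90 : (if PySem.Int.mod 90 100 = 11 ∨ PySem.Int.mod 90 100 = 12 ∨ PySem.Int.mod 90 100 = 13 then "th" else PySem.Dict.getD pvSUFFIX (PySem.Int.mod 90 10) "th") = "th" := by decide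
  have c91 : (if PySem.Int.mod 91 100 = 11 ∨ PySem.Int.mod 91 100 = 12 ∨ PySem.Int.mod 91 100 = 13 then "th" else PySem.Dict.getD pvSUFFIX (PySem.Int.mod 91 10) "th") = "st" := by decide
  have c92 : (if PySem.Int.mod 92 100 = 11 ∨ PySem.Int.mod 92 100 = 12 ∨ PySem.Int.mod 92 100 = 13 then "th" else PySem.Dict.getD pvSUFFIX (PySem.Int.mod 92 10) "th") = "nd" := by decide
  have c93 : (if PySem.Int.mod 93 100 = 11 ∨ PySem.Int.mod 93 100 = 12 ∨ PySem.Int.mod 93 100 = 13 then "th" else PySem.Dict.getD pvSUFFIX (PySem.Int.mod 93 10) "th") = "rd" := by decide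
  have c94 : (if PySem.Int.mod 94 100 = 11 ∨ PySem.Int.mod 94 100 = 12 ∨ PySem.Int.mod 94 100 = 13 then "th" else PySem.Dict.getD pvSUFFIX (PySem.Int.mod 94 10) "th") = "th" := by decide
  have c95 : (if PySem.Int.mod 95 100 = 11 ∨ PySem.Int.mod 95 100 = 12 ∨ PySem.Int.mod 95 100 = 13 then "th" else PySem.Dict.getD pvSUFFIX (PySem.Int.mod 95 10) "th") = "th" := by decide
  have c96 : (if PySem.Int.mod 96 100 = 11 ∨ PySem.Int.mod 96 100 = 12 ∨ PySem.Int.mod 96 100 = 13 then "th" else PySem.Dict.getD pvSUFFIX (PySem.Int.mod 96 10) "th") = "th" := by decide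
  have c97 : (if PySem.Int.mod 97 100 = 11 ∨ PySem.Int.mod 97 100 = 12 ∨ PySem.Int.mod 97 100 = 13 then "th" else PySem.Dict.getD pvSUFFIX (PySem.Int.mod 97 10) "th") = "th" := by decide
  have c98 : (if PySem.Int.mod 98 100 = 11 ∨ PySem.Int.mod 98 100 = 12 ∨ PySem.Int.mod 98 100 = 13 then "th" else PySem.Dict.getD pvSUFFIX (PySem.Int.mod 98 10) "th") = "th" := by decide
  have c99 : (if PySem.Int.mod 99 100 = 11 ∨ PySem.Int.mod 99 100 = 12 ∨ PySem.Int.mod 99 100 = 13 then "th" else PySem.Dict.getD pvSUFFIX (PySem.Int.mod 99 10) "th") = "th" := by decide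
  simp only [strict_params_range_py, strict_params_range_py_alt, pvTensA,
    pvST, pvND, pvRD, pvTH, pvRange100, r0, r1, r2, r3, List.map, List.flatMap,
    List.foldl, c0, c1, c2, c3, c4, c5, c6, c7, c8, c9, c10, c11, c12, c13, c14, c15, c16, c17, c18, c19, c20, c21, c22, c23, c24, c25, c26, c27, c28, c29, c30, c31, c32, c33, c34, c35, c36, c37, c38, c39, c40, c41, c42, c43, c44, c45, c46, c47, c48, c49, c50, c51, c52, c53, c54, c55, c56, c57, c58, c59, c60, c61, c62, c63, c64, c65, c66, c67, c68, c69, c70, c71, c72, c73, c74, c75, c76, c77, c78, c79, c80, c81, c82, c83, c84, c85, c86, c87, c88, c89, c90, c91, c92, c93, c94, c95, c96, c97, c98, c99,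
    List.append_nil, List.nil_append, List.cons_append, List.cons.injEq,
    Prod.mk.injEq, List.flatten, and_true, true_and]
  repeat' apply And.intro
  all_goals first
    | rfl
    | omega
    | (try simp only [List.append_eq, List.cons_append, List.nil_append, List.cons.injEq, Prod.mk.injEq,
         and_true, true_and]
       repeat' apply And.intro
       all_goals first | rfl | omega)
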